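-- pv_equiv track=rewrite | github.com/lucawint/CRFNER | src/html_helpers.py | _tuples_to_inline
-- ===== SOURCE A (Python) =====
-- OTHER_ENT_TYPE = 'O'
--
-- def _tuples_to_inline(tuples: list, c_by_c: bool):
--     inline_str = ''
--     tuples_iter = iter(tuples)
--
--     def add_entity(token, ent_type, c_by_c: bool,
--                    prev_was_entity=False):
--         """
--         Recursive function for adding entities to the inline string.
--         :param token: The entity's current token.
--         :param ent_type: Entity type of current token.
--         :param c_by_c: Whether to do char by char processing.
--         :param prev_was_entity: Whether previous call to this function
--                                 in the stack was from this function.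
--         :return:
--         """
--         content = []
--         curr_str = ''
--         orig_ent_type = ent_type
--         stopped = False
--
--         if not prev_was_entity:
--             curr_str += f'<{orig_ent_type}>'
--
--         while ent_type == orig_ent_type:
--             content.append(token)
--             try:
--                 token, ent_type = next(tuples_iter)
--             except StopIteration:
--                 stopped = True
--                 break
--
--         if c_by_c:
--             curr_str += ''.join(content)
--             curr_str += f'</{orig_ent_type}>'
--
--             if not stopped:
--                 if ent_type == OTHER_ENT_TYPE:
--                     curr_str += f'{token}'
--                 else:
--                     curr_str += f'<{ent_type}>'
--                     curr_str += add_entity(token, ent_type, c_by_c,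
--                                            prev_was_entity=True)
--         else:
--             curr_str += ' '.join(content)
--             curr_str += f'</{orig_ent_type}>'
--             if not c_by_c:
--                 curr_str += ' '
--
--             if not stopped:
--                 if ent_type == OTHER_ENT_TYPE:
--                     curr_str += f'{token}'
--                     if not c_by_c:
--                         curr_str += ' '
--                 else:
--                     curr_str += f'<{ent_type}>'
--                     curr_str += add_entity(token, ent_type, c_by_c,
--                                            prev_was_entity=True)
--
--         return curr_str
--
--     # Process tokens tuple by tuple
--     for token, ent_type in tuples_iter:
--         if ent_type == OTHER_ENT_TYPE:
--             if c_by_c: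
--                 inline_str += f'{token}'
--             else:
--                 inline_str += f'{token} '
--         else:
--             inline_str += add_entity(token, ent_type, c_by_c)
--
--     if not c_by_c:
--         inline_str = inline_str.rstrip()
--
--     return inline_str
-- ===== SOURCE B (Python) =====
-- OTHER_ENT_TYPE = 'O'
--
-- def _tuples_to_inline(tuples: list, c_by_c: bool):
--     sep = '' if c_by_c else ' '
--     pieces = []
--     cur_type = None  # entity type of the run being collected, None if none
--     cur = []         # tokens of the run being collected
--
--     def flush():
--         if cur_type is not None:
--             pieces.append(f'<{cur_type}>' + sep.join(cur) + f'</{cur_type}>' + sep)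
--
--     for token, ent_type in tuples:
--         if ent_type == OTHER_ENT_TYPE:
--             flush()
--             cur_type, cur = None, []
--             pieces.append(token + sep)
--         elif ent_type == cur_type:
--             cur.append(token)
--         else:
--             flush()
--             cur_type, cur = ent_type, [token]
--     flush()
--
--     result = ''.join(pieces)
--     return result if c_by_c else result.rstrip()
-- ===== Notes on version B (the rewrite author's own statement) =====
-- stated objective: simpler
-- what changed: Replaced the recursive add_entity helper that shares a mutable iterator and handles the token after a run (and chained entity runs) inside itself with a single flat index loop that consumes each maximal same-type run in place, appends the tagged piece to a list, and joins once at the end.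
import Mathlib
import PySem

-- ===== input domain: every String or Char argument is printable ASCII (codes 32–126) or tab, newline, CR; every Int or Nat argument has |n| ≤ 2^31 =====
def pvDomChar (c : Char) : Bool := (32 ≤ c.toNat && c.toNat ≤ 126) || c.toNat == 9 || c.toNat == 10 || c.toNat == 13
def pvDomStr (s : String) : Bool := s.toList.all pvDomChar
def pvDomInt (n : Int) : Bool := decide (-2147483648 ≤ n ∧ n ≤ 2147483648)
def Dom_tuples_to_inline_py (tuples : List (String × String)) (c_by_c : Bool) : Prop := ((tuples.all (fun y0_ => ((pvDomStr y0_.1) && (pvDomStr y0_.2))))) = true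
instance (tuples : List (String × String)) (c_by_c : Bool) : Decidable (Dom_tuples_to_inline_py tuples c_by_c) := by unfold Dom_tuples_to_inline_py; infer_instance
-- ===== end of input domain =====

-- B replaces A's recursive, iterator-sharing `add_entity` helper with a single one-pass
-- accumulator loop (current run type + collected tokens, flushed on type change) joined
-- at the end (objective: simpler; same O(n) cost).


-- ===== PORT A =====
-- The `while ent_type == orig_ent_type` loop of add_entity, drawing from the shared
-- iterator: returns (tokens appended after the entry token, the pair that broke the
-- loop if any (none = StopIteration), the rest of the iterator).
def pvConsume (orig : String) : List (String × String) → (List String × Option (String × String) × List (String × String))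
  | [] => ([], none, [])
  | (t, e) :: rs =>
    if e == orig then
      let r := pvConsume orig rs
      (t :: r.1, r.2.1, r.2.2)
    else ([], some (t, e), rs)

-- add_entity: given the current (token, ent_type), whether the previous call was from
-- add_entity itself, and the rest of the shared iterator; returns the string it builds
-- and the iterator state it leaves behind.  The extra `fuel` argument only makes the
-- recursion structural (every call site supplies fuel > length of the iterator, so the
-- fuel-exhausted branch is never taken).
def pvAddEntity (c_by_c : Bool) : Nat → String → String → Bool → List (String × String) → String × List (String × String)
  | 0, _, _, _, it => ("", it)
  | fuel + 1, token, ent_type, prev_was_entity, it =>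
    let pre := if prev_was_entity then "" else "<" ++ ent_type ++ ">"
    let r := pvConsume ent_type it
    let content := token :: r.1
    if c_by_c then
      let s := pre ++ PySem.Str.join "" content ++ ("</" ++ ent_type ++ ">")
      match r.2.1 with
      | none => (s, r.2.2)
      | some (t2, e2) =>
        if e2 == "O" then (s ++ t2, r.2.2)
        else
          let rc := pvAddEntity c_by_c fuel t2 e2 true r.2.2
          (s ++ ("<" ++ e2 ++ ">") ++ rc.1, rc.2)
    else
      let s := pre ++ PySem.Str.join " " content ++ ("</" ++ ent_type ++ ">") ++ " "
      match r.2.1 with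
      | none => (s, r.2.2)
      | some (t2, e2) =>
        if e2 == "O" then (s ++ t2 ++ " ", r.2.2)
        else
          let rc := pvAddEntity c_by_c fuel t2 e2 true r.2.2
          (s ++ ("<" ++ e2 ++ ">") ++ rc.1, rc.2)

-- the outer `for token, ent_type in tuples_iter` loop building inline_str (same fuel guard)
def pvALoop (c_by_c : Bool) : Nat → List (String × String) → String
  | _, [] => ""
  | 0, _ :: _ => ""
  | fuel + 1, (t, e) :: rs =>
    if e == "O" then
      (if c_by_c then t else t ++ " ") ++ pvALoop c_by_c fuel rs
    else
      let r := pvAddEntity c_by_c (fuel + 1) t e false rs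
      r.1 ++ pvALoop c_by_c fuel r.2

def tuples_to_inline_py (tuples : List (String × String)) (c_by_c : Bool) : String :=
  let inline_str := pvALoop c_by_c tuples.length tuples
  if c_by_c then inline_str else PySem.Str.rstrip inline_str

-- ===== PORT B =====
-- flush(): the piece for the currently collected run (no piece when no run is open)
def pvFlush (sep : String) : Option String → List String → List String
  | none, _ => []
  | some ty, cur => ["<" ++ ty ++ ">" ++ PySem.Str.join sep cur ++ ("</" ++ ty ++ ">") ++ sep]

-- the `for token, ent_type in tuples` loop carrying (cur_type, cur), flushing on type
-- change, plus the final flush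
def pvBGo (sep : String) (cur_type : Option String) (cur : List String) : List (String × String) → List String
  | [] => pvFlush sep cur_type cur
  | (t, e) :: rs =>
    if e == "O" then pvFlush sep cur_type cur ++ ((t ++ sep) :: pvBGo sep none [] rs)
    else if some e == cur_type then pvBGo sep cur_type (cur ++ [t]) rs
    else pvFlush sep cur_type cur ++ pvBGo sep (some e) [t] rs

def tuples_to_inline_py_alt (tuples : List (String × String)) (c_by_c : Bool) : String :=
  let sep := if c_by_c then "" else " "
  let result := PySem.Str.join "" (pvBGo sep none [] tuples)
  if c_by_c then result else PySem.Str.rstrip result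

-- ===== PRECONDITION & SPEC =====
def Spec_tuples_to_inline_py (tuples : List (String × String)) (c_by_c : Bool) (out : String) : Prop := out = tuples_to_inline_py_alt tuples c_by_c
instance (tuples : List (String × String)) (c_by_c : Bool) (out : String) : Decidable (Spec_tuples_to_inline_py tuples c_by_c out) := by unfold Spec_tuples_to_inline_py; infer_instance

-- ===== CLAIM (what is proved, stated in full; the proofs are below) =====
def Claim_equal_tuples_to_inline_py : Prop := ∀ (tuples : List (String × String)) (c_by_c : Bool), Dom_tuples_to_inline_py tuples c_by_c → Spec_tuples_to_inline_py tuples c_by_c (tuples_to_inline_py tuples c_by_c)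

-- ===== LEMMAS AND PROOFS =====

theorem join0_cons (a : String) (l : List String) :
    PySem.Str.join "" (a :: l) = a ++ PySem.Str.join "" l := by
  rw [← String.toList_inj]
  cases l <;>
    simp [PySem.Str.toList_join, PySem.Chars.join, String.toList_append, List.intercalate]

theorem join0_nil : PySem.Str.join "" ([] : List String) = "" := rfl

theorem pvConsume_le (orig : String) :
    ∀ it : List (String × String), (pvConsume orig it).2.2.length ≤ it.length := by
  intro it
  induction it with
  | nil => simp [pvConsume]
  | cons p rs ih =>
    obtain ⟨t, e⟩ := p
    by_cases h : (e == orig) = true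
    · simp only [pvConsume, h, if_pos]
      exact Nat.le_trans ih (Nat.le_succ _)
    · simp [pvConsume, h]

theorem pvConsume_lt (orig : String) :
    ∀ it : List (String × String), ((pvConsume orig it).2.1).isSome = true →
      (pvConsume orig it).2.2.length < it.length := by
  intro it
  induction it with
  | nil => simp [pvConsume]
  | cons p rs ih =>
    obtain ⟨t, e⟩ := p
    by_cases h : (e == orig) = true
    · intro hs
      simp only [pvConsume, h, if_pos] at hs ⊢
      exact Nat.lt_trans (ih hs) (Nat.lt_succ_self _)
    · simp [pvConsume, h, Nat.lt_succ_self]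

theorem pvConsume_none_nil (ent : String) :
    ∀ l : List (String × String), (pvConsume ent l).2.1 = none →
      (pvConsume ent l).2.2 = [] := by
  intro l
  induction l with
  | nil => simp [pvConsume]
  | cons p rs ih =>
    obtain ⟨t, e⟩ := p
    by_cases h : (e == ent) = true
    · simp only [pvConsume, h, if_pos]; exact ih
    · simp [pvConsume, h]

-- with one unit of fuel in hand, prev_was_entity only decides the leading open tag
theorem pvAddEntity_prev (c_by_c : Bool) (fuel : Nat) (t e : String)
    (it : List (String × String)) :
    pvAddEntity c_by_c (fuel + 1) t e false it =
      ("<" ++ e ++ ">" ++ (pvAddEntity c_by_c (fuel + 1) t e true it).1,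
       (pvAddEntity c_by_c (fuel + 1) t e true it).2) := by
  cases c_by_c <;> simp only [pvAddEntity, Bool.false_eq_true, if_pos, if_neg] <;>
    rcases h : (pvConsume e it).2.1 with _ | ⟨t2, e2⟩ <;>
      simp_all <;> (try split_ifs) <;> simp [String.append_assoc]

-- pvBGo on an open run (some e, cur) in terms of what add_entity's while loop consumes
theorem pvBGo_open (sep : String) (e : String) (he : (e == "O") = false) :
    ∀ it : List (String × String), ∀ cur : List String,
      pvBGo sep (some e) cur it =
        ("<" ++ e ++ ">" ++ PySem.Str.join sep (cur ++ (pvConsume e it).1) ++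
            ("</" ++ e ++ ">") ++ sep) ::
          (match (pvConsume e it).2.1 with
           | none => []
           | some (t2, e2) =>
             if e2 == "O" then (t2 ++ sep) :: pvBGo sep none [] (pvConsume e it).2.2
             else pvBGo sep (some e2) [t2] (pvConsume e it).2.2) := by
  intro it
  induction it with
  | nil => intro cur; simp [pvBGo, pvConsume, pvFlush]
  | cons p rs ih =>
    intro cur
    obtain ⟨t', e'⟩ := p
    by_cases h : (e' == e) = true
    · have he' : (e' == "O") = false := by
        have : e' = e := by simpa using h
        simpa [this] using he
      simp only [pvBGo, pvConsume, h, if_pos, he', Bool.false_eq_true, if_neg, if_false]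
      have : (some e' == some e) = true := by simpa using h
      have he2 : e' = e := by simpa using h
      subst he2
      simp only [BEq.rfl, if_pos, ih (cur ++ [t'])]
      simp [List.append_assoc]
    · by_cases hO : (e' == "O") = true
      · have : e' = "O" := by simpa using hO
        subst this
        simp only [pvBGo, pvConsume, if_pos, pvFlush, h, Bool.false_eq_true, if_neg,
          if_false]
        simp [h]
      · have hne : (some e' == some e) = false := by simpa using h
        simp [pvBGo, pvConsume, h, hO, hne, pvFlush]

-- opening a run from the empty state
theorem pvBGo_none_cons (sep : String) (t e : String) (he : (e == "O") = false)
    (rs : List (String × String)) :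
    pvBGo sep none [] ((t, e) :: rs) = pvBGo sep (some e) [t] rs := by
  simp [pvBGo, pvFlush, he]

-- the iterator state add_entity leaves behind only shrinks
theorem pvAddEntity_le (c_by_c : Bool) :
    ∀ fuel : Nat, ∀ t e : String, ∀ prev : Bool, ∀ it : List (String × String),
      (pvAddEntity c_by_c fuel t e prev it).2.length ≤ it.length := by
  intro fuel
  induction fuel with
  | zero => intro t e prev it; simp [pvAddEntity]
  | succ n ih =>
    intro t e prev it
    have hc := pvConsume_le e it
    cases c_by_c <;> simp only [pvAddEntity, Bool.false_eq_true, if_pos, if_neg] <;>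
      rcases h : (pvConsume e it).2.1 with _ | ⟨t2, e2⟩ <;>
        simp only [h] <;>
        (all_goals first
          | exact hc
          | (split_ifs <;> first
              | exact hc
              | exact Nat.le_trans (ih t2 e2 true (pvConsume e it).2.2) hc))

-- main run lemma: the string add_entity builds, followed by B's rendering of the
-- iterator state it leaves, is B's rendering of the open-run state on the same input
theorem pvAddEntity_bgo (c_by_c : Bool) :
    ∀ fuel : Nat, ∀ it : List (String × String), it.length ≤ fuel →
      ∀ t e : String, (e == "O") = false →
      (pvAddEntity c_by_c (fuel + 1) t e false it).1 ++
          PySem.Str.join "" (pvBGo (if c_by_c then "" else " ") none []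
            (pvAddEntity c_by_c (fuel + 1) t e false it).2) =
        PySem.Str.join "" (pvBGo (if c_by_c then "" else " ") (some e) [t] it) := by
  intro fuel
  induction fuel with
  | zero =>
    intro it hle t e he
    have hit : it = [] := List.length_eq_zero_iff.mp (Nat.le_zero.mp hle)
    subst hit
    rw [pvBGo_open _ e he [] [t]]
    cases c_by_c <;>
      simp [pvAddEntity, pvConsume, pvBGo, pvFlush, join0_cons, join0_nil] <;>
      (rw [← String.toList_inj]; simp [String.toList_append])
  | succ n ih =>
    intro it hle t e he
    rw [pvBGo_open _ e he it [t]]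
    rcases h : (pvConsume e it).2.1 with _ | ⟨t2, e2⟩
    · have h2 := pvConsume_none_nil e it h
      cases c_by_c <;>
        simp_all [pvAddEntity, pvBGo, pvFlush, join0_cons, join0_nil] <;>
        (rw [← String.toList_inj]; simp [String.toList_append])
    · by_cases hO : (e2 == "O") = true
      · have : e2 = "O" := by simpa using hO
        subst this
        cases c_by_c <;>
          simp_all [pvAddEntity, join0_cons, join0_nil] <;>
          (rw [← String.toList_inj]; simp [String.toList_append])
      · have hlt : (pvConsume e it).2.2.length < it.length :=
          pvConsume_lt e it (by rw [h]; rfl)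
        have hO' : (e2 == "O") = false := by simpa using hO
        have hih := ih (pvConsume e it).2.2 (by omega) t2 e2 hO'
        rw [pvAddEntity_prev] at hih
        cases c_by_c <;>
          simp_all [pvAddEntity, join0_cons, join0_nil] <;>
          (rw [← String.toList_inj] at *; simp_all [String.toList_append])

theorem pvALoop_eq_bgo (c_by_c : Bool) :
    ∀ fuel : Nat, ∀ it : List (String × String), it.length ≤ fuel →
      pvALoop c_by_c fuel it =
        PySem.Str.join "" (pvBGo (if c_by_c then "" else " ") none [] it) := by
  intro fuel
  induction fuel with
  | zero =>
    intro it hle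
    have hit : it = [] := List.length_eq_zero_iff.mp (Nat.le_zero.mp hle)
    subst hit
    simp [pvALoop, pvBGo, pvFlush, join0_nil]
  | succ n ih =>
    intro it hle
    match it with
    | [] => simp [pvALoop, pvBGo, pvFlush, join0_nil]
    | (t, e) :: rs =>
      by_cases he : (e == "O") = true
      · have : e = "O" := by simpa using he
        subst this
        have h1 := ih rs (by simpa using Nat.succ_le_succ_iff.mp hle)
        cases c_by_c <;>
          simp_all [pvALoop, pvBGo, pvFlush, join0_cons] <;>
          (rw [← String.toList_inj]; simp [String.toList_append])
      · have he' : (e == "O") = false := by simpa using he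
        have hrs : rs.length ≤ n := by simpa using Nat.succ_le_succ_iff.mp hle
        have h2 := pvAddEntity_bgo c_by_c n rs hrs t e he'
        have h1 := ih (pvAddEntity c_by_c (n + 1) t e false rs).2
          (Nat.le_trans (pvAddEntity_le c_by_c (n + 1) t e false rs) hrs)
        rw [pvBGo_none_cons _ t e he' rs]
        simp only [pvALoop, he', Bool.false_eq_true, if_neg, if_false]
        rw [h1, h2]

-- ===== VERDICT (by name: the statement is the Claim_ definition above) =====
theorem tuples_to_inline_py_spec : Claim_equal_tuples_to_inline_py := by
  intro tuples c_by_c _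
  unfold Spec_tuples_to_inline_py tuples_to_inline_py tuples_to_inline_py_alt
  simp only [pvALoop_eq_bgo c_by_c tuples.length tuples le_rfl]
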